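-- pv_equiv track=rewrite | github.com/nickLayman/Class-Projects | S20 MTH 499 - Number Theory/Homework Programs/HWPrograms.py | factorial_mod
-- ===== SOURCE A (Python) =====
-- def factorial_mod(n):
--     """
--     For each n, find (n-1)! (mod n)
--     """
--     if n == 1:
--         return 0
--     if n <= 0:
--         raise Exception(f"{n-1}! does not exist.")
--     val = 1
--     for i in range(2, n):
--         val = val*i % n
--     return val
-- ===== SOURCE B (Python) =====
-- def factorial_mod(n):
--     """
--     For each n, find (n-1)! (mod n) via Wilson's theorem:
--     prime n -> n-1, composite n>4 -> 0, n=4 -> 2, n=1 -> 0.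
--     """
--     if n == 1:
--         return 0
--     if n <= 0:
--         raise Exception(f"{n-1}! does not exist.")
--     if n == 4:
--         return 2
--     if _is_prime(n):
--         return n - 1
--     return 0
--
-- def _is_prime(n):
--     if n < 2:
--         return False
--     d = 2
--     while d * d <= n:
--         if n % d == 0:
--             return False
--         d += 1
--     return True
-- ===== Notes on version B (the rewrite author's own statement) =====
-- stated objective: faster
-- what changed: Replaced the O(n) running-product loop by Wilson's theorem with a trial-division primality test: (n-1)! mod n is n-1 for prime n, 2 for n=4, 0 for other composite n>1, 0 for n=1.
import Mathlib
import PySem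

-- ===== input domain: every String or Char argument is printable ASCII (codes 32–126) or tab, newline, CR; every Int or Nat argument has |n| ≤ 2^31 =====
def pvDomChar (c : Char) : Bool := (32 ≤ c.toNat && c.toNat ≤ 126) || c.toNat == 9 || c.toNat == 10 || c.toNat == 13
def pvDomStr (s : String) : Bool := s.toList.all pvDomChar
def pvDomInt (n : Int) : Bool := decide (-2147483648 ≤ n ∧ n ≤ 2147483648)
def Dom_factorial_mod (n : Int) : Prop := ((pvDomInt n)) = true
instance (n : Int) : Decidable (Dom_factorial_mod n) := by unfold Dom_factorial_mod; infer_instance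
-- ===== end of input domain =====

-- B replaces A's O(n) running-product loop by Wilson's theorem with a √n trial-division
-- primality test (objective: faster, asymptotically).

-- ===== PORT A =====
-- for i in range(2, n): val = val*i % n
def factorial_mod (n : Int) : Int :=
  if n = 1 then 0
  else (PySem.List.pyRange 2 n 1).foldl (fun val i => PySem.Int.mod (val * i) n) 1

-- ===== PORT B =====
-- _is_prime's while loop: d = 2; while d*d <= n: if n % d == 0: return False; d += 1
def isPrimeAux (n d : Nat) : Bool :=
  if d * d ≤ n then
    (if n % d = 0 then false else isPrimeAux n (d + 1))
  else true
termination_by n + 1 - d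
decreasing_by
  rcases Nat.eq_zero_or_pos d with rfl | hd0
  · omega
  · have hd : d ≤ d * d := Nat.le_mul_of_pos_left d hd0
    omega

def isPrimeB (n : Int) : Bool := if n < 2 then false else isPrimeAux n.toNat 2

def factorial_mod_alt (n : Int) : Int :=
  if n = 1 then 0
  else if n = 4 then 2
  else if isPrimeB n then n - 1
  else 0

-- ===== PRECONDITION & SPEC =====
-- Pre_ excludes exactly n ≤ 0, where the Python A raises Exception.
def Pre_factorial_mod (n : Int) : Prop := 1 ≤ n
instance (n : Int) : Decidable (Pre_factorial_mod n) := by unfold Pre_factorial_mod; infer_instance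
def pvWitness_factorial_mod : Int := 7

def Spec_factorial_mod (n : Int) (out : Int) : Prop := out = factorial_mod_alt n
instance (n : Int) (out : Int) : Decidable (Spec_factorial_mod n out) := by unfold Spec_factorial_mod; infer_instance

-- ===== CLAIM (what is proved, stated in full; the proofs are below) =====
def Claim_equal_factorial_mod : Prop := ∀ (n : Int), Dom_factorial_mod n → Pre_factorial_mod n → Spec_factorial_mod n (factorial_mod n)

-- ===== LEMMAS AND PROOFS =====

-- A's loop keeps val ≡ running product (mod n).
theorem foldl_emod (nn : Int) : ∀ (l : List Int) (v : Int),
    l.foldl (fun val i => (val * i) % nn) (v % nn) = (v * l.prod) % nn := by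
  intro l
  induction l with
  | nil => intro v; simp
  | cons a l ih =>
    intro v
    simp only [List.foldl_cons, List.prod_cons]
    have h : (v % nn * a) % nn = (v * a) % nn := by
      rw [Int.mul_emod, Int.emod_emod_of_dvd _ dvd_rfl, ← Int.mul_emod]
    rw [h, ih (v * a), mul_assoc]

theorem prod_pyRange_factorial (m : Nat) (hm : 2 ≤ m) :
    (PySem.List.pyRange 2 (m : Int) 1).prod = ((m - 1).factorial : Int) := by
  induction m, hm using Nat.le_induction with
  | base => decide
  | succ m hm ih =>
    have hstep : PySem.List.pyRange 2 ((m : Int) + 1) 1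
        = PySem.List.pyRange 2 (m : Int) 1 ++ [(m : Int)] :=
      PySem.List.pyRange_one_succ_right (by exact_mod_cast hm)
    rw [show ((m + 1 : Nat) : Int) = (m : Int) + 1 from by push_cast; ring,
      hstep, List.prod_append, ih, List.prod_singleton]
    have : (m + 1 - 1).factorial = m * (m - 1).factorial := by
      simpa using (Nat.mul_factorial_pred (n := m) (by omega)).symm
    rw [this]; push_cast; ring

-- A's result for n ≥ 2 is (n-1)! mod n.
theorem factorial_mod_eq_fac_mod (m : Nat) (hm : 2 ≤ m) :
    factorial_mod (m : Int) = ((m - 1).factorial : Int) % (m : Int) := by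
  have hn1 : (m : Int) ≠ 1 := by omega
  have hpos : (0 : Int) < (m : Int) := by omega
  unfold factorial_mod
  rw [if_neg hn1]
  have hf : (fun (val i : Int) => PySem.Int.mod (val * i) (m : Int))
      = fun (val i : Int) => (val * i) % (m : Int) := by
    funext val i; exact PySem.Int.mod_eq_emod_of_pos hpos
  have hfold := foldl_emod (m : Int) (PySem.List.pyRange 2 (m : Int) 1) 1
  rw [Int.emod_eq_of_lt (by omega) (by omega)] at hfold
  rw [hf, hfold, one_mul, prod_pyRange_factorial m hm]

-- trial division: isPrimeAux n d = true iff no divisor ≥ d with square ≤ n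
theorem isPrimeAux_iff (n : Nat) : ∀ (d : Nat),
    isPrimeAux n d = true ↔ ∀ m, d ≤ m → m * m ≤ n → ¬ m ∣ n := by
  intro d
  induction d using isPrimeAux.induct n with
  | case1 d hdd hmod =>
    rw [isPrimeAux, if_pos hdd, if_pos hmod]
    simp only [Bool.false_eq_true, false_iff]
    push Not
    exact ⟨d, le_refl d, hdd, Nat.dvd_of_mod_eq_zero hmod⟩
  | case2 d hdd hmod ih =>
    rw [isPrimeAux, if_pos hdd, if_neg hmod]
    rw [ih]
    constructor
    · intro h m hdm hmm hdvd
      rcases Nat.eq_or_lt_of_le hdm with rfl | hlt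
      · exact hmod (Nat.dvd_iff_mod_eq_zero.mp hdvd)
      · exact h m (by omega) hmm hdvd
    · intro h m hdm hmm hdvd
      exact h m (by omega) hmm hdvd
  | case3 d hdd =>
    rw [isPrimeAux, if_neg hdd]
    simp only [true_iff]
    intro m hdm hmm hdvd
    exact hdd (le_trans (Nat.mul_le_mul hdm hdm) hmm)

theorem isPrimeB_iff (m : Nat) (hm : 2 ≤ m) :
    isPrimeB (m : Int) = true ↔ Nat.Prime m := by
  unfold isPrimeB
  rw [if_neg (by omega), Int.toNat_natCast, isPrimeAux_iff]
  rw [Nat.prime_def_le_sqrt]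
  constructor
  · intro h
    exact ⟨hm, fun k hk hks => h k hk (Nat.le_sqrt.mp hks)⟩
  · intro h k hk hkk
    exact h.2 k hk (Nat.le_sqrt.mpr hkk)

-- Wilson's theorem, Int form: prime p → (p-1)! % p = p - 1
theorem wilson_prime (p : Nat) (hp : p.Prime) :
    ((p - 1).factorial : Int) % (p : Int) = (p : Int) - 1 := by
  haveI : Fact p.Prime := ⟨hp⟩
  have h2 : 2 ≤ p := hp.two_le
  have hz : ((p - 1).factorial : ZMod p) = ((p - 1 : Nat) : ZMod p) := by
    rw [ZMod.wilsons_lemma]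
    have : ((p - 1 : Nat) : ZMod p) = (p : ZMod p) - 1 := by
      push_cast [Nat.cast_sub (by omega : 1 ≤ p)]; ring
    rw [this, ZMod.natCast_self, zero_sub]
  have hmodeq : (p - 1).factorial ≡ (p - 1) [MOD p] :=
    (ZMod.natCast_eq_natCast_iff _ _ _).mp hz
  have hnat : (p - 1).factorial % p = (p - 1) % p := hmodeq
  have hsmall : (p - 1) % p = p - 1 := Nat.mod_eq_of_lt (by omega)
  have : ((p - 1).factorial % p : Nat) = (p - 1 : Nat) := by rw [hnat, hsmall]
  calc ((p - 1).factorial : Int) % (p : Int)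
      = (((p - 1).factorial % p : Nat) : Int) := (Int.natCast_emod _ _).symm
    _ = ((p - 1 : Nat) : Int) := by rw [this]
    _ = (p : Int) - 1 := by push_cast [Nat.cast_sub (by omega : 1 ≤ p)]; ring

-- a*b divides N! when 0 < a < b ≤ N
theorem mul_dvd_factorial (a b N : Nat) (ha : 0 < a) (hab : a < b) (hbN : b ≤ N) :
    a * b ∣ N.factorial := by
  have h1 : a ∣ (b - 1).factorial := Nat.dvd_factorial ha (by omega)
  have h2 : a * b ∣ (b - 1).factorial * b := mul_dvd_mul h1 dvd_rfl
  have h3 : (b - 1).factorial * b = b.factorial := by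
    rw [mul_comm]; exact Nat.mul_factorial_pred (by omega)
  rw [h3] at h2
  exact dvd_trans h2 (Nat.factorial_dvd_factorial hbN)

-- composite m ≠ 4 divides (m-1)!
theorem composite_dvd_fac (m : Nat) (h2 : 2 ≤ m) (hnp : ¬ m.Prime) (h4 : m ≠ 4) :
    m ∣ (m - 1).factorial := by
  set p := m.minFac with hpdef
  have hp : p.Prime := Nat.minFac_prime (by omega)
  have hpd : p ∣ m := Nat.minFac_dvd m
  obtain ⟨q, hq⟩ := hpd
  have hp2 : 2 ≤ p := hp.two_le
  have hq2 : 2 ≤ q := by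
    rcases Nat.lt_or_ge q 2 with h | h
    · interval_cases q
      · omega
      · exfalso; apply hnp; rw [hq, mul_one]; exact hp
    · exact h
  have hpm : p < m := by nlinarith
  have hqm : q < m := by nlinarith
  by_cases hpq : p = q
  · -- m = p^2, p ≥ 3 since m ≠ 4
    subst hpq
    have hp3 : 3 ≤ p := by
      rcases Nat.lt_or_ge p 3 with h | h
      · interval_cases p; omega
      · exact h
    have hb : 2 * p ≤ m - 1 := by
      have h21 : 2 * p + 1 ≤ m := by nlinarith
      omega
    have hd : p * (2 * p) ∣ (m - 1).factorial :=
      mul_dvd_factorial p (2 * p) (m - 1) (by omega) (by omega) hb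
    exact dvd_trans ⟨2, by rw [hq]; ring⟩ hd
  · rcases Nat.lt_or_gt_of_ne hpq with hlt | hgt
    · have := mul_dvd_factorial p q (m - 1) (by omega) hlt (by omega)
      exact dvd_trans (dvd_of_eq hq) this
    · have := mul_dvd_factorial q p (m - 1) (by omega) hgt (by omega)
      exact dvd_trans (dvd_of_eq (by rw [hq, mul_comm])) this

-- ===== VERDICT (by name: the statement is the Claim_ definition above) =====
theorem factorial_mod_spec : Claim_equal_factorial_mod := by
  intro n _ hpre
  unfold Spec_factorial_mod
  by_cases h1 : n = 1
  · subst h1; decide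
  by_cases h4 : n = 4
  · subst h4; decide
  -- n ≥ 2, n ≠ 4
  have h2 : 2 ≤ n := by
    have : 1 ≤ n := hpre
    omega
  obtain ⟨m, rfl⟩ : ∃ m : Nat, n = (m : Int) := ⟨n.toNat, by omega⟩
  have hm2 : 2 ≤ m := by exact_mod_cast h2
  have hm4 : m ≠ 4 := by intro h; exact h4 (by exact_mod_cast congrArg (Nat.cast : Nat → Int) h)
  rw [factorial_mod_eq_fac_mod m hm2]
  unfold factorial_mod_alt
  rw [if_neg h1, if_neg h4]
  by_cases hp : Nat.Prime m
  · rw [if_pos ((isPrimeB_iff m hm2).mpr hp)]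
    exact wilson_prime m hp
  · rw [if_neg (by simp [isPrimeB_iff m hm2, hp])]
    have hdvd : (m : Int) ∣ ((m - 1).factorial : Int) :=
      Int.natCast_dvd_natCast.mpr (composite_dvd_fac m hm2 hp hm4)
    exact Int.emod_eq_zero_of_dvd hdvd
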